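-- pv_equiv track=rewrite | github.com/yuttasartviratpan/trivy-report-parent-vuln-dep-finder | src/trivy_script_project/root_dependency_bfs.py | bfs
-- ===== SOURCE A (Python) =====
-- from typing import List, Dict
-- from collections import deque
--
-- def bfs(dependency_graph: Dict, root_dependency: List, dependency_key: str) -> List:
--     ans_lst = []
--     visited = set()  # Set to keep track of visited nodes
--     queue = deque([dependency_key])  # Initialize the queue with the starting node
--
--     while queue:
--         node = queue.popleft()  # Dequeue a node from the queue
--
--         # Check if the node has already been visited
--         if node in visited:
--             continue
--
--         # Mark the node as visited
--         visited.add(node)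
--
--         # Check if the current node is in the search list
--         if node in root_dependency:
--             ans_lst.append(node)
--
--         # Add the neighbors of the current node to the queue
--         if node in dependency_graph:
--             for neighbor in dependency_graph[node]:
--                 queue.append(neighbor)
--
--     return ans_lst
-- ===== SOURCE B (Python) =====
-- def bfs(dependency_graph, root_dependency, dependency_key):
--     ans_lst = []
--     visited = set()
--     frontier = [dependency_key]  # current BFS level
--     while frontier:
--         next_frontier = []
--         for node in frontier:
--             if node in visited:
--                 continue
--             visited.add(node)
--             if node in root_dependency:
--                 ans_lst.append(node)
--             if node in dependency_graph:
--                 next_frontier.extend(dependency_graph[node])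
--         frontier = next_frontier
--     return ans_lst
-- ===== Notes on version B (the rewrite author's own statement) =====
-- stated objective: alternative
-- what changed: Single deque-driven BFS loop replaced by level-synchronized BFS: an outer while over frontier lists and an inner for loop that builds the next frontier, keeping the same FIFO visit order.
import Mathlib
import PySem

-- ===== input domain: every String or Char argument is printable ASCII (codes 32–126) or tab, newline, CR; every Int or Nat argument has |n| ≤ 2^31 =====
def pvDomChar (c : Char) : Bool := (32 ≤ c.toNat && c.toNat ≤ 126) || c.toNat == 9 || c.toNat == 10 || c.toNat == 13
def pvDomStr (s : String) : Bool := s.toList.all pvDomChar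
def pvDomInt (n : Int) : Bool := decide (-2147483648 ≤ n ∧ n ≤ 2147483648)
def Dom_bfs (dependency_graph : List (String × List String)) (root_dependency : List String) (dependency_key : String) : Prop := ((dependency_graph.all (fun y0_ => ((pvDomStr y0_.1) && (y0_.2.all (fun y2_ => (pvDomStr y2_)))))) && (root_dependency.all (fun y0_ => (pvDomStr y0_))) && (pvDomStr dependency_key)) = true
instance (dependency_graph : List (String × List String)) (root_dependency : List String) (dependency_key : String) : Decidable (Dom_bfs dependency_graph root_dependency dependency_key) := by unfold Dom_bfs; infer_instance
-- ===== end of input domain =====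

-- B rewrites A's single deque-driven BFS loop as level-synchronized BFS (frontier lists,
-- nested level loop), same FIFO visit order and identical return value; alternative decomposition.

-- dict membership + indexing: 'node in dependency_graph' / 'dependency_graph[node]'
-- (first matching key; exact for Python dicts, which have unique keys). Shared by both ports.
def findNbrs : List (String × List String) → String → Option (List String)
  | [], _ => none
  | (k, v) :: rest, node => if k == node then some v else findNbrs rest node

-- termination measure for both loops: number of not-yet-visited candidate nodes, then pending length
def freshCount (g : List (String × List String)) (pending : List String)
    (visited : PySem.Set String) : Nat :=
  (((g.flatMap Prod.snd) ++ pending).toFinset.filter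
    (fun x => ¬ PySem.Set.contains visited x)).card

theorem findNbrs_mem {g : List (String × List String)} {node : String} {v : List String}
    (h : findNbrs g node = some v) : ∀ x ∈ v, x ∈ g.flatMap Prod.snd := by
  induction g with
  | nil => simp [findNbrs] at h
  | cons p rest ih =>
    obtain ⟨k, w⟩ := p
    simp only [findNbrs] at h
    intro x hx
    rw [List.flatMap_cons]
    by_cases hk : (k == node) = true
    · rw [if_pos hk] at h
      cases h
      exact List.mem_append.mpr (Or.inl hx)
    · rw [if_neg hk] at h
      exact List.mem_append.mpr (Or.inr (ih h x hx))

theorem contains_add_of_contains (s : PySem.Set String) (y x : String)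
    (h : PySem.Set.contains s x = true) : PySem.Set.contains (PySem.Set.add s y) x = true := by
  simp only [PySem.Set.add]
  split
  · exact h
  · simp only [PySem.Set.contains] at *
    simp at h ⊢
    exact Or.inl h

theorem contains_add_self (s : PySem.Set String) (x : String) :
    PySem.Set.contains (PySem.Set.add s x) x = true := by
  simp only [PySem.Set.add]
  split
  · assumption
  · simp only [PySem.Set.contains]; simp

theorem freshCount_lt (g : List (String × List String)) (p p' : List String)
    (v v' : PySem.Set String)
    (hsub : ∀ x ∈ p', x ∈ g.flatMap Prod.snd ∨ x ∈ p)
    (hmono : ∀ x, PySem.Set.contains v x = true → PySem.Set.contains v' x = true)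
    (node : String) (hnode : node ∈ g.flatMap Prod.snd ∨ node ∈ p)
    (hfresh : PySem.Set.contains v node = false)
    (hnow : PySem.Set.contains v' node = true) :
    freshCount g p' v' < freshCount g p v := by
  apply Finset.card_lt_card
  constructor
  · intro x hx
    simp only [Finset.mem_filter, List.mem_toFinset, List.mem_append] at hx ⊢
    obtain ⟨hx1, hx2⟩ := hx
    refine ⟨?_, ?_⟩
    · rcases hx1 with h | h
      · exact Or.inl h
      · exact hsub x h
    · intro hc; exact hx2 (hmono x hc)
  · intro hall
    have hmem : node ∈ (((g.flatMap Prod.snd) ++ p').toFinset.filter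
        (fun x => ¬ PySem.Set.contains v' x)) := by
      apply hall
      simp only [Finset.mem_filter, List.mem_toFinset, List.mem_append]
      refine ⟨hnode, ?_⟩
      rw [hfresh]
      simp
    rw [Finset.mem_filter] at hmem
    exact hmem.2 hnow

theorem freshCount_le (g : List (String × List String)) (p p' : List String)
    (v : PySem.Set String)
    (hsub : ∀ x ∈ p', x ∈ g.flatMap Prod.snd ∨ x ∈ p) :
    freshCount g p' v ≤ freshCount g p v := by
  apply Finset.card_le_card
  intro x hx
  simp only [Finset.mem_filter, List.mem_toFinset, List.mem_append] at hx ⊢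
  obtain ⟨hx1, hx2⟩ := hx
  refine ⟨?_, hx2⟩
  rcases hx1 with h | h
  · exact Or.inl h
  · exact hsub x h

-- ===== PORT A =====
-- A's while loop over a deque: pop the front, skip visited, record roots, push neighbors at the back.
def bfsLoop (g : List (String × List String)) (roots : List String)
    (queue : List String) (visited : PySem.Set String) (ans : List String) : List String :=
  match queue with
  | [] => ans
  | node :: rest =>
    if PySem.Set.contains visited node then
      bfsLoop g roots rest visited ans
    else
      bfsLoop g roots
        (match findNbrs g node with
          | some nbrs => rest ++ nbrs
          | none => rest)
        (PySem.Set.add visited node)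
        (if roots.contains node then ans ++ [node] else ans)
  termination_by (freshCount g queue visited, queue.length)
  decreasing_by
  · rcases lt_or_eq_of_le (freshCount_le g (node :: rest) rest visited
        (fun x hx => Or.inr (List.mem_cons_of_mem _ hx))) with h | h
    · exact Prod.Lex.left _ _ h
    · rw [h]; exact Prod.Lex.right _ (by simp)
  · apply Prod.Lex.left
    apply freshCount_lt g (node :: rest) _ visited (PySem.Set.add visited node)
    · intro x hx
      split at hx
      · rename_i nbrs hn
        rcases List.mem_append.mp hx with h | h
        · exact Or.inr (List.mem_cons_of_mem _ h)
        · exact Or.inl (findNbrs_mem hn x h)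
      · exact Or.inr (List.mem_cons_of_mem _ hx)
    · exact fun x h => contains_add_of_contains _ _ _ h
    · exact Or.inr (List.mem_cons_self)
    · simpa using ‹¬ PySem.Set.contains visited node = true›
    · exact contains_add_self _ _

def bfs (dependency_graph : List (String × List String)) (root_dependency : List String) (dependency_key : String) : List String :=
  bfsLoop dependency_graph root_dependency [dependency_key] PySem.Set.empty []

-- ===== PORT B =====
-- B's inner 'for node in frontier' loop: returns (visited, ans_lst, next_frontier).
def levelStep (g : List (String × List String)) (roots : List String) :
    List String → PySem.Set String → List String → List String →
    (PySem.Set String × List String × List String)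
  | [], visited, ans, next => (visited, ans, next)
  | node :: rest, visited, ans, next =>
    if PySem.Set.contains visited node then
      levelStep g roots rest visited ans next
    else
      levelStep g roots rest
        (PySem.Set.add visited node)
        (if roots.contains node then ans ++ [node] else ans)
        (match findNbrs g node with
          | some nbrs => next ++ nbrs
          | none => next)

theorem levelStep_next_sub (g : List (String × List String)) (roots : List String) :
    ∀ (f : List String) (v : PySem.Set String) (a next : List String),
      ∀ x ∈ (levelStep g roots f v a next).2.2, x ∈ g.flatMap Prod.snd ∨ x ∈ next := by
  intro f
  induction f with
  | nil => intro v a next x hx; exact Or.inr hx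
  | cons node rest ih =>
    intro v a next x hx
    simp only [levelStep] at hx
    split at hx
    · exact ih v a next x hx
    · rcases ih _ _ _ x hx with h | h
      · exact Or.inl h
      · split at h
        · rename_i nbrs hn
          rcases List.mem_append.mp h with h' | h'
          · exact Or.inr h'
          · exact Or.inl (findNbrs_mem hn x h')
        · exact Or.inr h

theorem levelStep_visited_mono (g : List (String × List String)) (roots : List String) :
    ∀ (f : List String) (v : PySem.Set String) (a next : List String) (x : String),
      PySem.Set.contains v x = true →
      PySem.Set.contains (levelStep g roots f v a next).1 x = true := by
  intro f
  induction f with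
  | nil => intro v a next x hx; exact hx
  | cons node rest ih =>
    intro v a next x hx
    simp only [levelStep]
    split
    · exact ih v a next x hx
    · exact ih _ _ _ x (contains_add_of_contains _ _ _ hx)

theorem levelStep_cases (g : List (String × List String)) (roots : List String) :
    ∀ (f : List String) (v : PySem.Set String) (a next : List String),
      (∃ x ∈ f, PySem.Set.contains v x = false ∧
        PySem.Set.contains (levelStep g roots f v a next).1 x = true) ∨
      levelStep g roots f v a next = (v, a, next) := by
  intro f
  induction f with
  | nil => intro v a next; exact Or.inr rfl
  | cons node rest ih =>
    intro v a next
    by_cases hc : PySem.Set.contains v node = true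
    · rcases ih v a next with ⟨x, hx, h1, h2⟩ | h
      · refine Or.inl ⟨x, List.mem_cons_of_mem _ hx, h1, ?_⟩
        simp only [levelStep]; rw [if_pos hc]; exact h2
      · right
        simp only [levelStep]; rw [if_pos hc]; exact h
    · left
      refine ⟨node, List.mem_cons_self, by simpa using hc, ?_⟩
      simp only [levelStep, if_neg hc]
      exact levelStep_visited_mono g roots rest _ _ _ node (contains_add_self _ _)

-- B's outer 'while frontier' loop.
def bfsAltLoop (g : List (String × List String)) (roots : List String)
    (frontier : List String) (visited : PySem.Set String) (ans : List String) : List String :=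
  match frontier with
  | [] => ans
  | node :: rest =>
    let t := levelStep g roots (node :: rest) visited ans []
    bfsAltLoop g roots t.2.2 t.1 t.2.1
  termination_by (freshCount g frontier visited, frontier.length)
  decreasing_by
  rcases levelStep_cases g roots (node :: rest) visited ans [] with ⟨x, hx, h1, h2⟩ | h
  · apply Prod.Lex.left
    apply freshCount_lt g (node :: rest) _ visited _
    · intro y hy
      rcases levelStep_next_sub g roots (node :: rest) visited ans [] y hy with h' | h'
      · exact Or.inl h'
      · simp at h'
    · exact fun y h => levelStep_visited_mono g roots _ _ _ _ y h
    · exact Or.inr hx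
    · exact h1
    · exact h2
  · rw [h]
    rcases lt_or_eq_of_le (freshCount_le g (node :: rest) [] visited (by simp)) with h' | h'
    · exact Prod.Lex.left _ _ h'
    · rw [h']; exact Prod.Lex.right _ (by simp)

def bfs_alt (dependency_graph : List (String × List String)) (root_dependency : List String) (dependency_key : String) : List String :=
  bfsAltLoop dependency_graph root_dependency [dependency_key] PySem.Set.empty []

-- ===== PRECONDITION & SPEC =====
def Spec_bfs (dependency_graph : List (String × List String)) (root_dependency : List String) (dependency_key : String) (out : List String) : Prop := out = bfs_alt dependency_graph root_dependency dependency_key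
instance (dependency_graph : List (String × List String)) (root_dependency : List String) (dependency_key : String) (out : List String) : Decidable (Spec_bfs dependency_graph root_dependency dependency_key out) := by unfold Spec_bfs; infer_instance

-- ===== CLAIM (what is proved, stated in full; the proofs are below) =====
def Claim_equal_bfs : Prop := ∀ (dependency_graph : List (String × List String)) (root_dependency : List String) (dependency_key : String), Dom_bfs dependency_graph root_dependency dependency_key → Spec_bfs dependency_graph root_dependency dependency_key (bfs dependency_graph root_dependency dependency_key)

-- ===== LEMMAS AND PROOFS =====

-- A's queue at any moment is (rest of current level) ++ (next level accumulated so far).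
theorem bfsLoop_levelStep (g : List (String × List String)) (roots : List String) :
    ∀ (f : List String) (v : PySem.Set String) (a next : List String),
      bfsLoop g roots (f ++ next) v a =
        (let t := levelStep g roots f v a next;
         bfsLoop g roots t.2.2 t.1 t.2.1) := by
  intro f
  induction f with
  | nil => intro v a next; simp [levelStep]
  | cons node rest ih =>
    intro v a next
    rw [List.cons_append, bfsLoop]
    by_cases hc : PySem.Set.contains v node = true
    · rw [if_pos hc]
      simp only [levelStep]
      rw [if_pos hc]
      exact ih v a next
    · rw [if_neg hc]
      simp only [levelStep]
      rw [if_neg hc]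
      cases hn : findNbrs g node with
      | some nbrs =>
        dsimp only
        rw [List.append_assoc]
        exact ih _ _ (next ++ nbrs)
      | none =>
        dsimp only
        exact ih _ _ next

theorem bfsLoop_eq_bfsAltLoop (g : List (String × List String)) (roots : List String) :
    ∀ (frontier : List String) (v : PySem.Set String) (a : List String),
      bfsLoop g roots frontier v a = bfsAltLoop g roots frontier v a := by
  intro frontier v a
  induction frontier, v, a using bfsAltLoop.induct g roots with
  | case1 v a => simp [bfsLoop, bfsAltLoop]
  | case2 v a node rest t ih =>
    rw [bfsAltLoop]
    have h := bfsLoop_levelStep g roots (node :: rest) v a []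
    simp only [List.append_nil] at h
    rw [h]
    exact ih

-- ===== VERDICT (by name: the statement is the Claim_ definition above) =====
theorem bfs_spec : Claim_equal_bfs := by
  intro g roots key _
  unfold Spec_bfs bfs bfs_alt
  exact bfsLoop_eq_bfsAltLoop g roots [key] PySem.Set.empty []
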